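-- pv_equiv track=rewrite | github.com/Simha-Reddy/OMAR | OMAR_refactor/src/omar/services/transforms.py | _order_categorize
-- ===== SOURCE A (Python) =====
-- from typing import Any, Dict, List, Optional, Tuple
--
-- def _order_categorize(service: Optional[str], group: Optional[str], order_type: Optional[str], name: Optional[str]) -> str:
--     service_low = (service or '').strip().lower()
--     group_low = (group or '').strip().lower()
--     type_low = (order_type or '').strip().lower()
--     name_low = (name or '').strip().lower()
--
--     def contains_any(text: str, needles: tuple[str, ...]) -> bool:
--         return any(needle in text for needle in needles if needle)
--
--     if (
--         service_low.startswith('lr')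
--         or group_low in {'ch', 'mi', 'sp', 'cy', 'ap', 'lab'}
--         or contains_any(type_low, ('lab', 'chem', 'hemat', 'micro', 'path', 'specimen', 'culture'))
--         or contains_any(name_low, ('lab', 'panel', 'cbc', 'chem', 'culture', 'pathology', 'specimen'))
--     ):
--         return 'labs'
--     if (
--         service_low.startswith('ps')
--         or service_low in {'pha', 'pharm', 'pharmacy'}
--         or group_low in {'med', 'rx', 'ps', 'psj', 'pharm', 'unit dose', 'clinicmed'}
--         or contains_any(type_low, ('med', 'pharm', 'prescription', 'drug', 'dose'))
--         or contains_any(name_low, ('med', 'pharm', 'tablet', 'capsule', 'dose', 'rx'))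
--     ):
--         return 'meds'
--     if (
--         service_low.startswith('ra')
--         or 'radiology' in service_low
--         or 'imaging' in service_low
--         or group_low in {'imaging', 'rad', 'ra'}
--         or contains_any(type_low, ('imaging', 'radiology', 'x-ray', 'xray', 'ct', 'mri', 'ultrasound', 'nuclear'))
--         or contains_any(name_low, ('imaging', 'radiology', 'x-ray', 'xray', 'ct ', ' mri', 'ultrasound', 'nuclear', 'pet'))
--     ):
--         return 'imaging'
--     if (
--         service_low in {'gmrc', 'consult', 'con'}
--         or contains_any(type_low, ('consult', 'referral'))
--         or contains_any(name_low, ('consult', 'referral'))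
--     ):
--         return 'consults'
--     if (
--         'nurs' in service_low
--         or 'nurse' in group_low
--         or contains_any(type_low, ('nurs', 'nursing'))
--         or contains_any(name_low, ('nurs', 'nursing'))
--     ):
--         return 'nursing'
--     return 'other'
-- ===== SOURCE B (Python) =====
-- # B: transposed, field-major classifier. Instead of per-category branches, each
-- # FIELD carries one flat table mapping its triggers to a category priority index;
-- # one pass accumulates the minimum matched index (no early return), then the
-- # category name is looked up at the end. Correct because A returns the first
-- # (lowest-index) category whose condition holds, i.e. the minimum matched index.
--
-- _CATS = ('labs', 'meds', 'imaging', 'consults', 'nursing')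
--
-- _SVC_PREFIX = (('lr', 0), ('ps', 1), ('ra', 2))
-- _SVC_EXACT = {'pha': 1, 'pharm': 1, 'pharmacy': 1, 'gmrc': 3, 'consult': 3, 'con': 3}
-- _SVC_SUB = (('radiology', 2), ('imaging', 2), ('nurs', 4))
-- _GRP_EXACT = {'ch': 0, 'mi': 0, 'sp': 0, 'cy': 0, 'ap': 0, 'lab': 0,
--               'med': 1, 'rx': 1, 'ps': 1, 'psj': 1, 'pharm': 1, 'unit dose': 1,
--               'clinicmed': 1, 'imaging': 2, 'rad': 2, 'ra': 2}
-- _GRP_SUB = (('nurse', 4),)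
-- _TYPE_SUB = (('lab', 0), ('chem', 0), ('hemat', 0), ('micro', 0), ('path', 0),
--              ('specimen', 0), ('culture', 0),
--              ('med', 1), ('pharm', 1), ('prescription', 1), ('drug', 1), ('dose', 1),
--              ('imaging', 2), ('radiology', 2), ('x-ray', 2), ('xray', 2), ('ct', 2),
--              ('mri', 2), ('ultrasound', 2), ('nuclear', 2),
--              ('consult', 3), ('referral', 3),
--              ('nurs', 4), ('nursing', 4))
-- _NAME_SUB = (('lab', 0), ('panel', 0), ('cbc', 0), ('chem', 0), ('culture', 0),
--              ('pathology', 0), ('specimen', 0),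
--              ('med', 1), ('pharm', 1), ('tablet', 1), ('capsule', 1), ('dose', 1), ('rx', 1),
--              ('imaging', 2), ('radiology', 2), ('x-ray', 2), ('xray', 2), ('ct ', 2),
--              (' mri', 2), ('ultrasound', 2), ('nuclear', 2), ('pet', 2),
--              ('consult', 3), ('referral', 3),
--              ('nurs', 4), ('nursing', 4))
--
--
-- def _order_categorize(service, group, order_type, name):
--     svc = (service or '').strip().lower()
--     grp = (group or '').strip().lower()
--     typ = (order_type or '').strip().lower()
--     nm = (name or '').strip().lower()
--
--     best = 5
--     for pre, c in _SVC_PREFIX: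
--         if c < best and svc.startswith(pre):
--             best = c
--     c = _SVC_EXACT.get(svc, 5)
--     if c < best:
--         best = c
--     for sub, c in _SVC_SUB:
--         if c < best and sub in svc:
--             best = c
--     c = _GRP_EXACT.get(grp, 5)
--     if c < best:
--         best = c
--     for sub, c in _GRP_SUB:
--         if c < best and sub in grp:
--             best = c
--     for sub, c in _TYPE_SUB:
--         if c < best and sub in typ:
--             best = c
--     for sub, c in _NAME_SUB:
--         if c < best and sub in nm:
--             best = c
--     return _CATS[best] if best < 5 else 'other'
-- ===== Notes on version B (the rewrite author's own statement) =====
-- stated objective: alternative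
-- what changed: Transposed the classifier: instead of A's ordered per-category branch chain with early returns, B keeps one flat trigger->priority table per FIELD, accumulates the minimum matched priority index in a single pass with no early exit, and looks the category name up at the end (A's first-true-branch equals the minimum matched index).
import Mathlib
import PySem

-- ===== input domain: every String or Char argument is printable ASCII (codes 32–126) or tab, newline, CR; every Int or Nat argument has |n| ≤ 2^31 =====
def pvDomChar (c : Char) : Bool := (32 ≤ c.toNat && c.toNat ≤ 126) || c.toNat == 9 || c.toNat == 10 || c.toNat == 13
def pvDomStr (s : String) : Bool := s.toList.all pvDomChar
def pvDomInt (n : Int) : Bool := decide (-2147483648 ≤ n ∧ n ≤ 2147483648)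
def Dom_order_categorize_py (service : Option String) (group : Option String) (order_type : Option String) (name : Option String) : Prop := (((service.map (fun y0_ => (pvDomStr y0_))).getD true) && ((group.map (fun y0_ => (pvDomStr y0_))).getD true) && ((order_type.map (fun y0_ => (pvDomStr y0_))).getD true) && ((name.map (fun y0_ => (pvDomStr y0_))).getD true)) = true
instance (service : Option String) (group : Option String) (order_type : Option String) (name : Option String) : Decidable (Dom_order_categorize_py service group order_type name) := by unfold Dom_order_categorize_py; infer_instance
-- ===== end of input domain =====

-- B transposes A's ordered per-category branch chain into field-major trigger->priority
-- tables scanned once with a running minimum index (objective: alternative structure, same cost).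

-- ===== PORT A =====
-- contains_any(text, needles): any(needle in text for needle in needles if needle)
def pvContainsAny (text : String) (needles : List String) : Bool :=
  needles.any (fun nd => !(nd == "") && PySem.Str.isIn nd text)

def order_categorize_py (service : Option String) (group : Option String) (order_type : Option String) (name : Option String) : String :=
  let service_low := PySem.Str.lower (PySem.Str.strip (service.getD ""))
  let group_low := PySem.Str.lower (PySem.Str.strip (group.getD ""))
  let type_low := PySem.Str.lower (PySem.Str.strip (order_type.getD ""))
  let name_low := PySem.Str.lower (PySem.Str.strip (name.getD ""))
  if PySem.Str.startswith service_low "lr"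
      || ["ch", "mi", "sp", "cy", "ap", "lab"].contains group_low
      || pvContainsAny type_low ["lab", "chem", "hemat", "micro", "path", "specimen", "culture"]
      || pvContainsAny name_low ["lab", "panel", "cbc", "chem", "culture", "pathology", "specimen"] then
    "labs"
  else if PySem.Str.startswith service_low "ps"
      || ["pha", "pharm", "pharmacy"].contains service_low
      || ["med", "rx", "ps", "psj", "pharm", "unit dose", "clinicmed"].contains group_low
      || pvContainsAny type_low ["med", "pharm", "prescription", "drug", "dose"]
      || pvContainsAny name_low ["med", "pharm", "tablet", "capsule", "dose", "rx"] then
    "meds"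
  else if PySem.Str.startswith service_low "ra"
      || PySem.Str.isIn "radiology" service_low
      || PySem.Str.isIn "imaging" service_low
      || ["imaging", "rad", "ra"].contains group_low
      || pvContainsAny type_low ["imaging", "radiology", "x-ray", "xray", "ct", "mri", "ultrasound", "nuclear"]
      || pvContainsAny name_low ["imaging", "radiology", "x-ray", "xray", "ct ", " mri", "ultrasound", "nuclear", "pet"] then
    "imaging"
  else if ["gmrc", "consult", "con"].contains service_low
      || pvContainsAny type_low ["consult", "referral"]
      || pvContainsAny name_low ["consult", "referral"] then
    "consults"
  else if PySem.Str.isIn "nurs" service_low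
      || PySem.Str.isIn "nurse" group_low
      || pvContainsAny type_low ["nurs", "nursing"]
      || pvContainsAny name_low ["nurs", "nursing"] then
    "nursing"
  else
    "other"

-- ===== PORT B =====
-- field-major tables: trigger -> category priority index (0 labs, 1 meds, 2 imaging, 3 consults, 4 nursing)
def pvCats : List String := ["labs", "meds", "imaging", "consults", "nursing"]

def pvSvcPrefix : List (String × Nat) := [("lr", 0), ("ps", 1), ("ra", 2)]
def pvSvcExact : PySem.Dict String Nat :=
  PySem.Dict.mk [("pha", 1), ("pharm", 1), ("pharmacy", 1), ("gmrc", 3), ("consult", 3), ("con", 3)]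
def pvSvcSub : List (String × Nat) := [("radiology", 2), ("imaging", 2), ("nurs", 4)]
def pvGrpExact : PySem.Dict String Nat :=
  PySem.Dict.mk [("ch", 0), ("mi", 0), ("sp", 0), ("cy", 0), ("ap", 0), ("lab", 0),
    ("med", 1), ("rx", 1), ("ps", 1), ("psj", 1), ("pharm", 1), ("unit dose", 1), ("clinicmed", 1),
    ("imaging", 2), ("rad", 2), ("ra", 2)]
def pvGrpSub : List (String × Nat) := [("nurse", 4)]
def pvTypeSub : List (String × Nat) :=
  [("lab", 0), ("chem", 0), ("hemat", 0), ("micro", 0), ("path", 0), ("specimen", 0), ("culture", 0),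
   ("med", 1), ("pharm", 1), ("prescription", 1), ("drug", 1), ("dose", 1),
   ("imaging", 2), ("radiology", 2), ("x-ray", 2), ("xray", 2), ("ct", 2), ("mri", 2), ("ultrasound", 2), ("nuclear", 2),
   ("consult", 3), ("referral", 3),
   ("nurs", 4), ("nursing", 4)]
def pvNameSub : List (String × Nat) :=
  [("lab", 0), ("panel", 0), ("cbc", 0), ("chem", 0), ("culture", 0), ("pathology", 0), ("specimen", 0),
   ("med", 1), ("pharm", 1), ("tablet", 1), ("capsule", 1), ("dose", 1), ("rx", 1),
   ("imaging", 2), ("radiology", 2), ("x-ray", 2), ("xray", 2), ("ct ", 2), (" mri", 2), ("ultrasound", 2), ("nuclear", 2), ("pet", 2),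
   ("consult", 3), ("referral", 3),
   ("nurs", 4), ("nursing", 4)]

-- 'for trig, c in tbl: if c < best and match(trig): best = c'
def pvScan (m : String → Bool) (best : Nat) (tbl : List (String × Nat)) : Nat :=
  tbl.foldl (fun b e => if e.2 < b && m e.1 then e.2 else b) best

-- 'c = d.get(s, 5); if c < best: best = c'
def pvExactGet (d : PySem.Dict String Nat) (s : String) (best : Nat) : Nat :=
  let c := PySem.Dict.getD d s 5
  if c < best then c else best

def pvBest (svc grp typ nm : String) : Nat :=
  pvScan (fun sub => PySem.Str.isIn sub nm) (pvScan (fun sub => PySem.Str.isIn sub typ)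
    (pvScan (fun sub => PySem.Str.isIn sub grp) (pvExactGet pvGrpExact grp
      (pvScan (fun sub => PySem.Str.isIn sub svc) (pvExactGet pvSvcExact svc
        (pvScan (fun p => PySem.Str.startswith svc p) 5 pvSvcPrefix)) pvSvcSub)) pvGrpSub) pvTypeSub) pvNameSub

def order_categorize_py_alt (service : Option String) (group : Option String) (order_type : Option String) (name : Option String) : String :=
  let svc := PySem.Str.lower (PySem.Str.strip (service.getD ""))
  let grp := PySem.Str.lower (PySem.Str.strip (group.getD ""))
  let typ := PySem.Str.lower (PySem.Str.strip (order_type.getD ""))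
  let nm := PySem.Str.lower (PySem.Str.strip (name.getD ""))
  let best := pvBest svc grp typ nm
  if best < 5 then pvCats.getD best "other" else "other"

-- ===== PRECONDITION & SPEC =====
def Spec_order_categorize_py (service : Option String) (group : Option String) (order_type : Option String) (name : Option String) (out : String) : Prop := out = order_categorize_py_alt service group order_type name
instance (service : Option String) (group : Option String) (order_type : Option String) (name : Option String) (out : String) : Decidable (Spec_order_categorize_py service group order_type name out) := by unfold Spec_order_categorize_py; infer_instance

-- ===== CLAIM (what is proved, stated in full; the proofs are below) =====
def Claim_equal_order_categorize_py : Prop := ∀ (service : Option String) (group : Option String) (order_type : Option String) (name : Option String), Dom_order_categorize_py service group order_type name → Spec_order_categorize_py service group order_type name (order_categorize_py service group order_type name)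

-- ===== LEMMAS AND PROOFS =====

-- A's five branch conditions, named for the proofs
def pvC0 (svc grp typ nm : String) : Bool :=
  PySem.Str.startswith svc "lr"
  || ["ch", "mi", "sp", "cy", "ap", "lab"].contains grp
  || pvContainsAny typ ["lab", "chem", "hemat", "micro", "path", "specimen", "culture"]
  || pvContainsAny nm ["lab", "panel", "cbc", "chem", "culture", "pathology", "specimen"]
def pvC1 (svc grp typ nm : String) : Bool :=
  PySem.Str.startswith svc "ps"
  || ["pha", "pharm", "pharmacy"].contains svc
  || ["med", "rx", "ps", "psj", "pharm", "unit dose", "clinicmed"].contains grp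
  || pvContainsAny typ ["med", "pharm", "prescription", "drug", "dose"]
  || pvContainsAny nm ["med", "pharm", "tablet", "capsule", "dose", "rx"]
def pvC2 (svc grp typ nm : String) : Bool :=
  PySem.Str.startswith svc "ra"
  || PySem.Str.isIn "radiology" svc
  || PySem.Str.isIn "imaging" svc
  || ["imaging", "rad", "ra"].contains grp
  || pvContainsAny typ ["imaging", "radiology", "x-ray", "xray", "ct", "mri", "ultrasound", "nuclear"]
  || pvContainsAny nm ["imaging", "radiology", "x-ray", "xray", "ct ", " mri", "ultrasound", "nuclear", "pet"]
def pvC3 (svc grp typ nm : String) : Bool :=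
  ["gmrc", "consult", "con"].contains svc
  || pvContainsAny typ ["consult", "referral"]
  || pvContainsAny nm ["consult", "referral"]
def pvC4 (svc grp typ nm : String) : Bool :=
  PySem.Str.isIn "nurs" svc
  || PySem.Str.isIn "nurse" grp
  || pvContainsAny typ ["nurs", "nursing"]
  || pvContainsAny nm ["nurs", "nursing"]

theorem pvAndTrue {a b : Bool} (h : (a && b) = true) : a = true ∧ b = true := by
  constructor <;> simp_all

theorem pvScan_le (m : String → Bool) (b : Nat) (t : List (String × Nat)) : pvScan m b t ≤ b := by
  induction t generalizing b with
  | nil => exact le_refl b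
  | cons e t ih =>
    simp only [pvScan, List.foldl_cons] at *
    refine le_trans (ih _) ?_
    split
    · rename_i h
      exact Nat.le_of_lt (by simpa using (pvAndTrue h).1)
    · exact le_refl b

theorem pvScan_le_of_mem (m : String → Bool) (b : Nat) (t : List (String × Nat)) (s : String) (c : Nat)
    (hm : (s, c) ∈ t) (h : m s = true) : pvScan m b t ≤ c := by
  induction t generalizing b with
  | nil => cases hm
  | cons e t ih =>
    simp only [pvScan, List.foldl_cons] at *
    rcases List.mem_cons.mp hm with he | ht
    · refine le_trans (pvScan_le m _ t) ?_
      rw [← he]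
      simp only [h, Bool.and_true]
      split
      · exact le_refl c
      · rename_i hc; simp at hc; omega
    · exact ih _ ht

theorem pvScan_cases (m : String → Bool) (b : Nat) (t : List (String × Nat)) :
    pvScan m b t = b ∨ ∃ p ∈ t, m p.1 = true ∧ pvScan m b t = p.2 := by
  induction t generalizing b with
  | nil => left; rfl
  | cons e t ih =>
    simp only [pvScan, List.foldl_cons] at *
    rcases ih (if e.2 < b && m e.1 then e.2 else b) with h | ⟨p, hp, hmp, he⟩
    · by_cases hc : (e.2 < b && m e.1) = true
      · right; exact ⟨e, List.mem_cons_self, (pvAndTrue hc).2, by rw [h]; simp [hc]⟩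
      · left; rw [h]; simp [hc]
    · right; exact ⟨p, List.mem_cons_of_mem e hp, hmp, he⟩

theorem pvExact_le (d : PySem.Dict String Nat) (s : String) (b : Nat) : pvExactGet d s b ≤ b := by
  simp only [pvExactGet]; split <;> omega

theorem pvExact_le_of_contains (d : PySem.Dict String Nat) (l : List String) (k : Nat) (s : String) (b : Nat)
    (hsub : ∀ x ∈ l, PySem.Dict.getD d x 5 = k) (h : l.contains s = true) : pvExactGet d s b ≤ k := by
  have hs : s ∈ l := by simpa using h
  have hk := hsub s hs
  simp only [pvExactGet, hk]
  split <;> omega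

theorem pvExact_cases (d : PySem.Dict String Nat) (s : String) (b : Nat) :
    pvExactGet d s b = b ∨ pvExactGet d s b = PySem.Dict.getD d s 5 := by
  simp only [pvExactGet]; split
  · right; rfl
  · left; rfl

-- a contains_any hit on needles all carrying value k bounds the scan by k
theorem pvScan_le_of_any (m : String → Bool) (b : Nat) (t : List (String × Nat)) (k : Nat) (l : List String)
    (hsub : ∀ s ∈ l, (s, k) ∈ t) (h : l.any (fun nd => !(nd == "") && m nd) = true) :
    pvScan m b t ≤ k := by
  rcases List.any_eq_true.mp h with ⟨s, hs, hm⟩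
  exact pvScan_le_of_mem m b t s k (hsub s hs) (pvAndTrue hm).2

-- a matched table entry of value k yields the contains_any atom back
theorem pvAny_of_mem (m : String → Bool) (t : List (String × Nat)) (k : Nat) (l : List String)
    (hsub : ∀ p ∈ t, p.2 = k → p.1 ∈ l ∧ p.1 ≠ "") (p : String × Nat)
    (hp : p ∈ t) (hm : m p.1 = true) (hk : p.2 = k) :
    l.any (fun nd => !(nd == "") && m nd) = true := by
  rcases hsub p hp hk with ⟨hmem, hne⟩
  exact List.any_eq_true.mpr ⟨p.1, hmem, by simp [hne, hm]⟩

-- a non-default getD value comes from an item of the dict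
theorem pvDict_mem_of_getD (d : PySem.Dict String Nat) (s : String) (v : Nat)
    (h : PySem.Dict.getD d s 5 = v) (hne : v ≠ 5) : (s, v) ∈ d.items := by
  rcases hg : PySem.Dict.get? d s with _ | w
  · rw [PySem.Dict.getD_eq_get?_getD, hg] at h
    simp at h
    omega
  · rw [PySem.Dict.getD_eq_get?_getD, hg] at h
    simp at h
    subst h
    exact PySem.Dict.mem_items_of_get?_eq_some d hg

-- pvBest's value is 5 or comes from a matched entry of one of the seven stages
theorem pvBest_cases (svc grp typ nm : String) :
    pvBest svc grp typ nm = 5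
    ∨ (∃ p ∈ pvSvcPrefix, PySem.Str.startswith svc p.1 = true ∧ pvBest svc grp typ nm = p.2)
    ∨ pvBest svc grp typ nm = PySem.Dict.getD pvSvcExact svc 5
    ∨ (∃ p ∈ pvSvcSub, PySem.Str.isIn p.1 svc = true ∧ pvBest svc grp typ nm = p.2)
    ∨ pvBest svc grp typ nm = PySem.Dict.getD pvGrpExact grp 5
    ∨ (∃ p ∈ pvGrpSub, PySem.Str.isIn p.1 grp = true ∧ pvBest svc grp typ nm = p.2)
    ∨ (∃ p ∈ pvTypeSub, PySem.Str.isIn p.1 typ = true ∧ pvBest svc grp typ nm = p.2)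
    ∨ (∃ p ∈ pvNameSub, PySem.Str.isIn p.1 nm = true ∧ pvBest svc grp typ nm = p.2) := by
  unfold pvBest
  rcases pvScan_cases (fun sub => PySem.Str.isIn sub nm) _ pvNameSub with h | hm
  case inr =>
    right; right; right; right; right; right; right; exact hm
  rw [h]
  rcases pvScan_cases (fun sub => PySem.Str.isIn sub typ) _ pvTypeSub with h | hm
  case inr =>
    right; right; right; right; right; right; left; exact hm
  rw [h]
  rcases pvScan_cases (fun sub => PySem.Str.isIn sub grp) _ pvGrpSub with h | hm
  case inr =>
    right; right; right; right; right; left; exact hm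
  rw [h]
  rcases pvExact_cases pvGrpExact grp _ with h | hm
  case inr =>
    right; right; right; right; left; exact hm
  rw [h]
  rcases pvScan_cases (fun sub => PySem.Str.isIn sub svc) _ pvSvcSub with h | hm
  case inr =>
    right; right; right; left; exact hm
  rw [h]
  rcases pvExact_cases pvSvcExact svc _ with h | hm
  case inr =>
    right; right; left; exact hm
  rw [h]
  rcases pvScan_cases (fun p => PySem.Str.startswith svc p) 5 pvSvcPrefix with h | hm
  case inr =>
    right; left; exact hm
  rw [h]
  left; rfl

theorem pvBest_le_five (svc grp typ nm : String) : pvBest svc grp typ nm ≤ 5 := by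
  unfold pvBest
  exact le_trans (pvScan_le _ _ _) (le_trans (pvScan_le _ _ _) (le_trans (pvScan_le _ _ _)
    (le_trans (pvExact_le _ _ _) (le_trans (pvScan_le _ _ _) (le_trans (pvExact_le _ _ _)
    (pvScan_le _ _ _))))))

-- the chain below the given stage only decreases
theorem pvBest_le_prefix (svc grp typ nm : String) :
    pvBest svc grp typ nm ≤ pvScan (fun p => PySem.Str.startswith svc p) 5 pvSvcPrefix := by
  unfold pvBest
  exact le_trans (pvScan_le _ _ _) (le_trans (pvScan_le _ _ _) (le_trans (pvScan_le _ _ _)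
    (le_trans (pvExact_le _ _ _) (le_trans (pvScan_le _ _ _) (pvExact_le _ _ _)))))

theorem pvBest_le_svcExact (svc grp typ nm : String) :
    pvBest svc grp typ nm ≤ pvExactGet pvSvcExact svc
      (pvScan (fun p => PySem.Str.startswith svc p) 5 pvSvcPrefix) := by
  unfold pvBest
  exact le_trans (pvScan_le _ _ _) (le_trans (pvScan_le _ _ _) (le_trans (pvScan_le _ _ _)
    (le_trans (pvExact_le _ _ _) (pvScan_le _ _ _))))

theorem pvBest_le_svcSub (svc grp typ nm : String) :
    pvBest svc grp typ nm ≤ pvScan (fun sub => PySem.Str.isIn sub svc) (pvExactGet pvSvcExact svc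
      (pvScan (fun p => PySem.Str.startswith svc p) 5 pvSvcPrefix)) pvSvcSub := by
  unfold pvBest
  exact le_trans (pvScan_le _ _ _) (le_trans (pvScan_le _ _ _) (le_trans (pvScan_le _ _ _)
    (pvExact_le _ _ _)))

theorem pvBest_le_grpExact (svc grp typ nm : String) :
    pvBest svc grp typ nm ≤ pvExactGet pvGrpExact grp
      (pvScan (fun sub => PySem.Str.isIn sub svc) (pvExactGet pvSvcExact svc
        (pvScan (fun p => PySem.Str.startswith svc p) 5 pvSvcPrefix)) pvSvcSub) := by
  unfold pvBest
  exact le_trans (pvScan_le _ _ _) (le_trans (pvScan_le _ _ _) (pvScan_le _ _ _))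

theorem pvBest_le_grpSub (svc grp typ nm : String) :
    pvBest svc grp typ nm ≤ pvScan (fun sub => PySem.Str.isIn sub grp) (pvExactGet pvGrpExact grp
      (pvScan (fun sub => PySem.Str.isIn sub svc) (pvExactGet pvSvcExact svc
        (pvScan (fun p => PySem.Str.startswith svc p) 5 pvSvcPrefix)) pvSvcSub)) pvGrpSub := by
  unfold pvBest
  exact le_trans (pvScan_le _ _ _) (pvScan_le _ _ _)

theorem pvBest_le_typ (svc grp typ nm : String) :
    pvBest svc grp typ nm ≤ pvScan (fun sub => PySem.Str.isIn sub typ)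
      (pvScan (fun sub => PySem.Str.isIn sub grp) (pvExactGet pvGrpExact grp
        (pvScan (fun sub => PySem.Str.isIn sub svc) (pvExactGet pvSvcExact svc
          (pvScan (fun p => PySem.Str.startswith svc p) 5 pvSvcPrefix)) pvSvcSub)) pvGrpSub) pvTypeSub := by
  unfold pvBest
  exact pvScan_le _ _ _

-- upper bounds from A's conditions
theorem le_of_C0 (svc grp typ nm : String) (h : pvC0 svc grp typ nm = true) :
    pvBest svc grp typ nm ≤ 0 := by
  unfold pvC0 at h
  simp only [Bool.or_eq_true] at h
  rcases h with ((h | h) | h) | h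
  · exact le_trans (pvBest_le_prefix svc grp typ nm)
      (pvScan_le_of_mem _ _ _ "lr" 0 (by simp [pvSvcPrefix]) h)
  · exact le_trans (pvBest_le_grpExact svc grp typ nm)
      (pvExact_le_of_contains _ ["ch", "mi", "sp", "cy", "ap", "lab"] 0 _ _ (by decide) h)
  · exact le_trans (pvBest_le_typ svc grp typ nm)
      (pvScan_le_of_any _ _ _ 0 ["lab", "chem", "hemat", "micro", "path", "specimen", "culture"] (by decide) h)
  · exact pvScan_le_of_any _ _ _ 0 ["lab", "panel", "cbc", "chem", "culture", "pathology", "specimen"] (by decide) h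

theorem le_of_C1 (svc grp typ nm : String) (h : pvC1 svc grp typ nm = true) :
    pvBest svc grp typ nm ≤ 1 := by
  unfold pvC1 at h
  simp only [Bool.or_eq_true] at h
  rcases h with (((h | h) | h) | h) | h
  · exact le_trans (pvBest_le_prefix svc grp typ nm)
      (pvScan_le_of_mem _ _ _ "ps" 1 (by simp [pvSvcPrefix]) h)
  · exact le_trans (pvBest_le_svcExact svc grp typ nm)
      (pvExact_le_of_contains _ ["pha", "pharm", "pharmacy"] 1 _ _ (by decide) h)
  · exact le_trans (pvBest_le_grpExact svc grp typ nm)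
      (pvExact_le_of_contains _ ["med", "rx", "ps", "psj", "pharm", "unit dose", "clinicmed"] 1 _ _ (by decide) h)
  · exact le_trans (pvBest_le_typ svc grp typ nm)
      (pvScan_le_of_any _ _ _ 1 ["med", "pharm", "prescription", "drug", "dose"] (by decide) h)
  · exact pvScan_le_of_any _ _ _ 1 ["med", "pharm", "tablet", "capsule", "dose", "rx"] (by decide) h

theorem le_of_C2 (svc grp typ nm : String) (h : pvC2 svc grp typ nm = true) :
    pvBest svc grp typ nm ≤ 2 := by
  unfold pvC2 at h
  simp only [Bool.or_eq_true] at h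
  rcases h with ((((h | h) | h) | h) | h) | h
  · exact le_trans (pvBest_le_prefix svc grp typ nm)
      (pvScan_le_of_mem _ _ _ "ra" 2 (by simp [pvSvcPrefix]) h)
  · exact le_trans (pvBest_le_svcSub svc grp typ nm)
      (pvScan_le_of_mem _ _ _ "radiology" 2 (by simp [pvSvcSub]) h)
  · exact le_trans (pvBest_le_svcSub svc grp typ nm)
      (pvScan_le_of_mem _ _ _ "imaging" 2 (by simp [pvSvcSub]) h)
  · exact le_trans (pvBest_le_grpExact svc grp typ nm)
      (pvExact_le_of_contains _ ["imaging", "rad", "ra"] 2 _ _ (by decide) h)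
  · exact le_trans (pvBest_le_typ svc grp typ nm)
      (pvScan_le_of_any _ _ _ 2 ["imaging", "radiology", "x-ray", "xray", "ct", "mri", "ultrasound", "nuclear"] (by decide) h)
  · exact pvScan_le_of_any _ _ _ 2 ["imaging", "radiology", "x-ray", "xray", "ct ", " mri", "ultrasound", "nuclear", "pet"] (by decide) h

theorem le_of_C3 (svc grp typ nm : String) (h : pvC3 svc grp typ nm = true) :
    pvBest svc grp typ nm ≤ 3 := by
  unfold pvC3 at h
  simp only [Bool.or_eq_true] at h
  rcases h with (h | h) | h
  · exact le_trans (pvBest_le_svcExact svc grp typ nm)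
      (pvExact_le_of_contains _ ["gmrc", "consult", "con"] 3 _ _ (by decide) h)
  · exact le_trans (pvBest_le_typ svc grp typ nm)
      (pvScan_le_of_any _ _ _ 3 ["consult", "referral"] (by decide) h)
  · exact pvScan_le_of_any _ _ _ 3 ["consult", "referral"] (by decide) h

theorem le_of_C4 (svc grp typ nm : String) (h : pvC4 svc grp typ nm = true) :
    pvBest svc grp typ nm ≤ 4 := by
  unfold pvC4 at h
  simp only [Bool.or_eq_true] at h
  rcases h with ((h | h) | h) | h
  · exact le_trans (pvBest_le_svcSub svc grp typ nm)
      (pvScan_le_of_mem _ _ _ "nurs" 4 (by simp [pvSvcSub]) h)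
  · exact le_trans (pvBest_le_grpSub svc grp typ nm)
      (pvScan_le_of_mem _ _ _ "nurse" 4 (by simp [pvGrpSub]) h)
  · exact le_trans (pvBest_le_typ svc grp typ nm)
      (pvScan_le_of_any _ _ _ 4 ["nurs", "nursing"] (by decide) h)
  · exact pvScan_le_of_any _ _ _ 4 ["nurs", "nursing"] (by decide) h

-- lower-bound converses: if pvBest lands on k, A's k-th condition fires
theorem C0_of_best (svc grp typ nm : String) (h : pvBest svc grp typ nm = 0) :
    pvC0 svc grp typ nm = true := by
  unfold pvC0
  simp only [Bool.or_eq_true]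
  rcases pvBest_cases svc grp typ nm with h5 | ⟨p, hp, hm, he⟩ | hex | ⟨p, hp, hm, he⟩ | hgex | ⟨p, hp, hm, he⟩ | ⟨p, hp, hm, he⟩ | ⟨p, hp, hm, he⟩
  · omega
  · simp only [pvSvcPrefix, List.mem_cons, List.not_mem_nil, or_false] at hp
    rcases hp with rfl | rfl | rfl
    · exact Or.inl (Or.inl (Or.inl hm))
    · omega
    · omega
  · have hd : PySem.Dict.getD pvSvcExact svc 5 = 0 := by omega
    have hmem := pvDict_mem_of_getD _ _ _ hd (by omega)
    simp [pvSvcExact] at hmem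
  · simp only [pvSvcSub, List.mem_cons, List.not_mem_nil, or_false] at hp
    rcases hp with rfl | rfl | rfl <;> omega
  · have hd : PySem.Dict.getD pvGrpExact grp 5 = 0 := by omega
    have hmem := pvDict_mem_of_getD _ _ _ hd (by omega)
    simp [pvGrpExact] at hmem
    rcases hmem with rfl | rfl | rfl | rfl | rfl | rfl <;> exact Or.inl (Or.inl (Or.inr (by decide)))
  · simp only [pvGrpSub, List.mem_cons, List.not_mem_nil, or_false] at hp
    rcases hp with rfl <;> omega
  · have hk : p.2 = 0 := by omega
    exact Or.inl (Or.inr (pvAny_of_mem _ pvTypeSub 0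
      ["lab", "chem", "hemat", "micro", "path", "specimen", "culture"] (by decide) p hp hm hk))
  · have hk : p.2 = 0 := by omega
    exact Or.inr (pvAny_of_mem _ pvNameSub 0
      ["lab", "panel", "cbc", "chem", "culture", "pathology", "specimen"] (by decide) p hp hm hk)

theorem C1_of_best (svc grp typ nm : String) (h : pvBest svc grp typ nm = 1) :
    pvC1 svc grp typ nm = true := by
  unfold pvC1
  simp only [Bool.or_eq_true]
  rcases pvBest_cases svc grp typ nm with h5 | ⟨p, hp, hm, he⟩ | hex | ⟨p, hp, hm, he⟩ | hgex | ⟨p, hp, hm, he⟩ | ⟨p, hp, hm, he⟩ | ⟨p, hp, hm, he⟩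
  · omega
  · simp only [pvSvcPrefix, List.mem_cons, List.not_mem_nil, or_false] at hp
    rcases hp with rfl | rfl | rfl
    · omega
    · exact Or.inl (Or.inl (Or.inl (Or.inl hm)))
    · omega
  · have hd : PySem.Dict.getD pvSvcExact svc 5 = 1 := by omega
    have hmem := pvDict_mem_of_getD _ _ _ hd (by omega)
    simp [pvSvcExact] at hmem
    rcases hmem with rfl | rfl | rfl <;> exact Or.inl (Or.inl (Or.inl (Or.inr (by decide))))
  · simp only [pvSvcSub, List.mem_cons, List.not_mem_nil, or_false] at hp
    rcases hp with rfl | rfl | rfl <;> omega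
  · have hd : PySem.Dict.getD pvGrpExact grp 5 = 1 := by omega
    have hmem := pvDict_mem_of_getD _ _ _ hd (by omega)
    simp [pvGrpExact] at hmem
    rcases hmem with rfl | rfl | rfl | rfl | rfl | rfl | rfl <;> exact Or.inl (Or.inl (Or.inr (by decide)))
  · simp only [pvGrpSub, List.mem_cons, List.not_mem_nil, or_false] at hp
    rcases hp with rfl <;> omega
  · have hk : p.2 = 1 := by omega
    exact Or.inl (Or.inr (pvAny_of_mem _ pvTypeSub 1
      ["med", "pharm", "prescription", "drug", "dose"] (by decide) p hp hm hk))
  · have hk : p.2 = 1 := by omega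
    exact Or.inr (pvAny_of_mem _ pvNameSub 1
      ["med", "pharm", "tablet", "capsule", "dose", "rx"] (by decide) p hp hm hk)

theorem C2_of_best (svc grp typ nm : String) (h : pvBest svc grp typ nm = 2) :
    pvC2 svc grp typ nm = true := by
  unfold pvC2
  simp only [Bool.or_eq_true]
  rcases pvBest_cases svc grp typ nm with h5 | ⟨p, hp, hm, he⟩ | hex | ⟨p, hp, hm, he⟩ | hgex | ⟨p, hp, hm, he⟩ | ⟨p, hp, hm, he⟩ | ⟨p, hp, hm, he⟩
  · omega
  · simp only [pvSvcPrefix, List.mem_cons, List.not_mem_nil, or_false] at hp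
    rcases hp with rfl | rfl | rfl
    · omega
    · omega
    · exact Or.inl (Or.inl (Or.inl (Or.inl (Or.inl hm))))
  · have hd : PySem.Dict.getD pvSvcExact svc 5 = 2 := by omega
    have hmem := pvDict_mem_of_getD _ _ _ hd (by omega)
    simp [pvSvcExact] at hmem
  · simp only [pvSvcSub, List.mem_cons, List.not_mem_nil, or_false] at hp
    rcases hp with rfl | rfl | rfl
    · exact Or.inl (Or.inl (Or.inl (Or.inl (Or.inr hm))))
    · exact Or.inl (Or.inl (Or.inl (Or.inr hm)))
    · omega
  · have hd : PySem.Dict.getD pvGrpExact grp 5 = 2 := by omega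
    have hmem := pvDict_mem_of_getD _ _ _ hd (by omega)
    simp [pvGrpExact] at hmem
    rcases hmem with rfl | rfl | rfl <;> exact Or.inl (Or.inl (Or.inr (by decide)))
  · simp only [pvGrpSub, List.mem_cons, List.not_mem_nil, or_false] at hp
    rcases hp with rfl <;> omega
  · have hk : p.2 = 2 := by omega
    exact Or.inl (Or.inr (pvAny_of_mem _ pvTypeSub 2
      ["imaging", "radiology", "x-ray", "xray", "ct", "mri", "ultrasound", "nuclear"] (by decide) p hp hm hk))
  · have hk : p.2 = 2 := by omega
    exact Or.inr (pvAny_of_mem _ pvNameSub 2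
      ["imaging", "radiology", "x-ray", "xray", "ct ", " mri", "ultrasound", "nuclear", "pet"] (by decide) p hp hm hk)

theorem C3_of_best (svc grp typ nm : String) (h : pvBest svc grp typ nm = 3) :
    pvC3 svc grp typ nm = true := by
  unfold pvC3
  simp only [Bool.or_eq_true]
  rcases pvBest_cases svc grp typ nm with h5 | ⟨p, hp, hm, he⟩ | hex | ⟨p, hp, hm, he⟩ | hgex | ⟨p, hp, hm, he⟩ | ⟨p, hp, hm, he⟩ | ⟨p, hp, hm, he⟩
  · omega
  · simp only [pvSvcPrefix, List.mem_cons, List.not_mem_nil, or_false] at hp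
    rcases hp with rfl | rfl | rfl <;> omega
  · have hd : PySem.Dict.getD pvSvcExact svc 5 = 3 := by omega
    have hmem := pvDict_mem_of_getD _ _ _ hd (by omega)
    simp [pvSvcExact] at hmem
    rcases hmem with rfl | rfl | rfl <;> exact Or.inl (Or.inl (by decide))
  · simp only [pvSvcSub, List.mem_cons, List.not_mem_nil, or_false] at hp
    rcases hp with rfl | rfl | rfl <;> omega
  · have hd : PySem.Dict.getD pvGrpExact grp 5 = 3 := by omega
    have hmem := pvDict_mem_of_getD _ _ _ hd (by omega)
    simp [pvGrpExact] at hmem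
  · simp only [pvGrpSub, List.mem_cons, List.not_mem_nil, or_false] at hp
    rcases hp with rfl <;> omega
  · have hk : p.2 = 3 := by omega
    exact Or.inl (Or.inr (pvAny_of_mem _ pvTypeSub 3
      ["consult", "referral"] (by decide) p hp hm hk))
  · have hk : p.2 = 3 := by omega
    exact Or.inr (pvAny_of_mem _ pvNameSub 3
      ["consult", "referral"] (by decide) p hp hm hk)

theorem C4_of_best (svc grp typ nm : String) (h : pvBest svc grp typ nm = 4) :
    pvC4 svc grp typ nm = true := by
  unfold pvC4
  simp only [Bool.or_eq_true]
  rcases pvBest_cases svc grp typ nm with h5 | ⟨p, hp, hm, he⟩ | hex | ⟨p, hp, hm, he⟩ | hgex | ⟨p, hp, hm, he⟩ | ⟨p, hp, hm, he⟩ | ⟨p, hp, hm, he⟩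
  · omega
  · simp only [pvSvcPrefix, List.mem_cons, List.not_mem_nil, or_false] at hp
    rcases hp with rfl | rfl | rfl <;> omega
  · have hd : PySem.Dict.getD pvSvcExact svc 5 = 4 := by omega
    have hmem := pvDict_mem_of_getD _ _ _ hd (by omega)
    simp [pvSvcExact] at hmem
  · simp only [pvSvcSub, List.mem_cons, List.not_mem_nil, or_false] at hp
    rcases hp with rfl | rfl | rfl
    · omega
    · omega
    · exact Or.inl (Or.inl (Or.inl hm))
  · have hd : PySem.Dict.getD pvGrpExact grp 5 = 4 := by omega
    have hmem := pvDict_mem_of_getD _ _ _ hd (by omega)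
    simp [pvGrpExact] at hmem
  · simp only [pvGrpSub, List.mem_cons, List.not_mem_nil, or_false] at hp
    rcases hp with rfl
    exact Or.inl (Or.inl (Or.inr hm))
  · have hk : p.2 = 4 := by omega
    exact Or.inl (Or.inr (pvAny_of_mem _ pvTypeSub 4
      ["nurs", "nursing"] (by decide) p hp hm hk))
  · have hk : p.2 = 4 := by omega
    exact Or.inr (pvAny_of_mem _ pvNameSub 4
      ["nurs", "nursing"] (by decide) p hp hm hk)

-- the minimum matched index equals the index of A's first true branch
theorem pvBest_eq (svc grp typ nm : String) :
    pvBest svc grp typ nm =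
      (if pvC0 svc grp typ nm then 0
       else if pvC1 svc grp typ nm then 1
       else if pvC2 svc grp typ nm then 2
       else if pvC3 svc grp typ nm then 3
       else if pvC4 svc grp typ nm then 4
       else 5) := by
  have hle5 := pvBest_le_five svc grp typ nm
  split_ifs with h0 h1 h2 h3 h4
  · have := le_of_C0 svc grp typ nm h0; omega
  · have hle := le_of_C1 svc grp typ nm h1
    have hne0 : pvBest svc grp typ nm ≠ 0 := fun hh => h0 (C0_of_best svc grp typ nm hh)
    omega
  · have hle := le_of_C2 svc grp typ nm h2
    have hne0 : pvBest svc grp typ nm ≠ 0 := fun hh => h0 (C0_of_best svc grp typ nm hh)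
    have hne1 : pvBest svc grp typ nm ≠ 1 := fun hh => h1 (C1_of_best svc grp typ nm hh)
    omega
  · have hle := le_of_C3 svc grp typ nm h3
    have hne0 : pvBest svc grp typ nm ≠ 0 := fun hh => h0 (C0_of_best svc grp typ nm hh)
    have hne1 : pvBest svc grp typ nm ≠ 1 := fun hh => h1 (C1_of_best svc grp typ nm hh)
    have hne2 : pvBest svc grp typ nm ≠ 2 := fun hh => h2 (C2_of_best svc grp typ nm hh)
    omega
  · have hle := le_of_C4 svc grp typ nm h4
    have hne0 : pvBest svc grp typ nm ≠ 0 := fun hh => h0 (C0_of_best svc grp typ nm hh)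
    have hne1 : pvBest svc grp typ nm ≠ 1 := fun hh => h1 (C1_of_best svc grp typ nm hh)
    have hne2 : pvBest svc grp typ nm ≠ 2 := fun hh => h2 (C2_of_best svc grp typ nm hh)
    have hne3 : pvBest svc grp typ nm ≠ 3 := fun hh => h3 (C3_of_best svc grp typ nm hh)
    omega
  · have hne0 : pvBest svc grp typ nm ≠ 0 := fun hh => h0 (C0_of_best svc grp typ nm hh)
    have hne1 : pvBest svc grp typ nm ≠ 1 := fun hh => h1 (C1_of_best svc grp typ nm hh)
    have hne2 : pvBest svc grp typ nm ≠ 2 := fun hh => h2 (C2_of_best svc grp typ nm hh)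
    have hne3 : pvBest svc grp typ nm ≠ 3 := fun hh => h3 (C3_of_best svc grp typ nm hh)
    have hne4 : pvBest svc grp typ nm ≠ 4 := fun hh => h4 (C4_of_best svc grp typ nm hh)
    omega

theorem order_categorize_eq (service group order_type name : Option String) :
    order_categorize_py service group order_type name
      = order_categorize_py_alt service group order_type name := by
  simp only [order_categorize_py, order_categorize_py_alt, pvBest_eq]
  simp only [pvC0, pvC1, pvC2, pvC3, pvC4]
  split_ifs <;> first | omega | simp [pvCats]

-- ===== VERDICT (by name: the statement is the Claim_ definition above) =====
theorem order_categorize_py_spec : Claim_equal_order_categorize_py := by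
  intro service group order_type name _
  exact order_categorize_eq service group order_type name
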